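-- pv_equiv track=rewrite | github.com/EphraiemSarabamoun/cracking-the-coding-interview | hard/17.7.py | baby_names
-- ===== SOURCE A (Python) =====
-- class UF:
--     def __init__(self, names: list[str]):
--         self.parent = {name: name for name in names}
--         self.rank = {name: 0 for name in names}
--
--     def find(self, x: str) -> str:
--         if self.parent[x] != x:
--             self.parent[x] = self.find(self.parent[x])
--         return self.parent[x]
--
--     def union(self, x: str, y: str):
--         px, py = self.find(x), self.find(y)
--         if px == py:
--             return
--         if self.rank[px] < self.rank[py]:
--             self.parent[px] = py
--         elif self.rank[px] > self.rank[py]: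
--             self.parent[py] = px
--         else:
--             self.parent[py] = px
--             self.rank[px] += 1
--
-- def baby_names(freq: dict[str, int], synonyms: list[tuple[str, str]]) -> dict[str, int]:
--     uf = UF(list(freq.keys()))
--     for a, b in synonyms:
--         uf.union(a, b)
--     group_sum = {}
--     for name in freq:
--         root = uf.find(name)
--         group_sum[root] = group_sum.get(root, 0) + freq[name]
--     result = {}
--     for name in freq:
--         root = uf.find(name)
--         result[name] = group_sum[root]
--     return result
-- ===== SOURCE B (Python) =====
-- def baby_names(freq, synonyms):
--     adj = {name: [] for name in freq}
--     for a, b in synonyms: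
--         adj[a].append(b)
--         adj[b].append(a)
--     result = {}
--     comp_sum = {}   # name -> sum for its component
--     for name in freq:
--         if name not in comp_sum:
--             stack = [name]
--             seen = {name}
--             total = 0
--             while stack:
--                 cur = stack.pop()
--                 total += freq[cur]
--                 for nb in adj[cur]:
--                     if nb not in seen:
--                         seen.add(nb)
--                         stack.append(nb)
--             for m in seen:
--                 comp_sum[m] = total
--         result[name] = comp_sum[name]
--     return result
-- ===== Notes on version B (the rewrite author's own statement) =====
-- stated objective: alternative
-- what changed: Replaces the union-find (parent/rank dicts, recursive find with path compression, per-name find passes) with an adjacency dict and an explicit iterative DFS that collects each connected component once and sums its frequencies directly.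
import Mathlib
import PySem

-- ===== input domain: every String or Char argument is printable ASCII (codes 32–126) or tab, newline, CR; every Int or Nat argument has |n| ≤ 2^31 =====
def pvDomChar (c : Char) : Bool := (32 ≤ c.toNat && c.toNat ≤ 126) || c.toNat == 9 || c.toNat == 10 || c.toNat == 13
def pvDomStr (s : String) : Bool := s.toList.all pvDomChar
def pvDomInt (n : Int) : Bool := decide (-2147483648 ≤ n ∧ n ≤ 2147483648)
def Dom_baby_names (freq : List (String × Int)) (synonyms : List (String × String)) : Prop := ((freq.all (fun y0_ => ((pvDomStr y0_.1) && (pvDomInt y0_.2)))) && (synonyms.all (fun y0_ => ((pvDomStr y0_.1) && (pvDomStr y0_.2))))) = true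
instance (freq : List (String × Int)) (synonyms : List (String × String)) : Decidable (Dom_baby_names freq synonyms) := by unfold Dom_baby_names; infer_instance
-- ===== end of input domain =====

-- B replaces A's union-find with adjacency lists + one explicit iterative DFS per component (alternative algorithm, same results).

-- ===== PORT A =====
-- UF.find with path compression; recursion bounded by fuel (a totality guard only:
-- the proofs show the fuel chosen in `baby_names` is never exhausted on admitted inputs).
-- `none` = KeyError (parent[x] missing) or fuel exhaustion.
def ufFind : Nat → PySem.Dict String String → String → Option (String × PySem.Dict String String)
  | 0, _, _ => none
  | fuel + 1, parent, x =>
    match parent.get? x with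
    | none => none
    | some px =>
      if px = x then some (x, parent)
      else
        match ufFind fuel parent px with
        | none => none
        | some (r, parent') => some (r, parent'.insert x r)  -- self.parent[x] = self.find(self.parent[x])

-- UF.union (by rank); threads (parent, rank); `none` = KeyError inside find
def ufUnion (fuel : Nat) (parent : PySem.Dict String String) (rank : PySem.Dict String Int)
    (x y : String) : Option (PySem.Dict String String × PySem.Dict String Int) :=
  match ufFind fuel parent x with
  | none => none
  | some (px, parent1) =>
    match ufFind fuel parent1 y with
    | none => none
    | some (py, parent2) =>
      if px = py then some (parent2, rank)
      else
        match rank.get? px, rank.get? py with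
        | some rx, some ry =>
          if rx < ry then some (parent2.insert px py, rank)
          else if rx > ry then some (parent2.insert py px, rank)
          else some (parent2.insert py px, rank.insert px (rx + 1))
        | _, _ => none
  -- rank lookups cannot fail here: px, py are keys whenever the finds succeed

def baby_names (freq : List (String × Int)) (synonyms : List (String × String)) : List (String × Int) :=
  let fd := PySem.Dict.ofList freq          -- the dict A receives
  let ks := fd.keys                         -- list(freq.keys()) / iteration order of freq
  let parent0 := ks.foldl (fun d k => d.insert k k) PySem.Dict.empty
  let rank0 := ks.foldl (fun d k => d.insert k (0 : Int)) PySem.Dict.empty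
  let fuel := synonyms.length + 2           -- totality guard for find's recursion (proved sufficient)
  match synonyms.foldl (fun st? pr => st?.bind fun st => ufUnion fuel st.1 st.2 pr.1 pr.2)
      (some (parent0, rank0)) with
  | none => []
  | some (p, _) =>
    -- group_sum loop (find keeps compressing, so the parent dict is threaded through)
    match ks.foldl (fun acc? k => acc?.bind fun acc =>
        (ufFind fuel acc.2 k).map fun rp =>
          -- group_sum[root] = group_sum.get(root, 0) + freq[name]; name is a key, so getD is exact
          (acc.1.insert rp.1 (acc.1.getD rp.1 0 + fd.getD k 0), rp.2))
        (some ((PySem.Dict.empty : PySem.Dict String Int), p)) with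
    | none => []
    | some (gs, p1) =>
      match ks.foldl (fun acc? k => acc?.bind fun acc =>
          (ufFind fuel acc.2 k).map fun rp =>
            -- result[name] = group_sum[root]; the root was inserted in the previous loop, so getD is exact
            (acc.1.insert k (gs.getD rp.1 0), rp.2))
          (some ((PySem.Dict.empty : PySem.Dict String Int), p1)) with
      | none => []
      | some (res, _) => res.items

-- ===== PORT B =====
-- iterative DFS: pop from the end of `stack`, sum freq over the component, collect `seen`.
-- fuel is a totality guard only (each iteration pops one element and every push is a fresh name).
-- `none` = KeyError (adj[cur] missing) or fuel exhaustion; `cur` is always a key of `fd` (so getD is exact for freq[cur]).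
def dfsCollect : Nat → PySem.Dict String (List String) → PySem.Dict String Int →
    List String → PySem.Set String → Int → Option (PySem.Set String × Int)
  | 0, _, _, _, _, _ => none
  | fuel + 1, adj, fd, stack, seen, total =>
    if h : stack = [] then some (seen, total)
    else
      let cur := stack.getLast h                -- cur = stack.pop()
      let total' := total + fd.getD cur 0       -- total += freq[cur]
      match adj.get? cur with
      | none => none
      | some nbs =>
        let st := nbs.foldl (fun (ss : PySem.Set String × List String) nb =>
            if PySem.Set.contains ss.1 nb then ss
            else (PySem.Set.add ss.1 nb, ss.2 ++ [nb]))
          (seen, stack.dropLast)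
        dfsCollect fuel adj fd st.2 st.1 total'

def baby_names_alt (freq : List (String × Int)) (synonyms : List (String × String)) : List (String × Int) :=
  let fd := PySem.Dict.ofList freq
  let ks := fd.keys
  let adj0 := ks.foldl (fun d k => d.insert k ([] : List String)) PySem.Dict.empty
  -- adj[a].append(b); adj[b].append(a)  (plain indexing: none = KeyError)
  match synonyms.foldl (fun d? pr => d?.bind fun d =>
      (d.get? pr.1).bind fun la =>
        let d1 := d.insert pr.1 (la ++ [pr.2])
        (d1.get? pr.2).map fun lb => d1.insert pr.2 (lb ++ [pr.1]))
      (some adj0) with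
  | none => []
  | some adj =>
    -- main loop: state = (result, comp_sum)
    match ks.foldl (fun acc? k => acc?.bind fun acc =>
        if acc.2.contains k then some (acc.1.insert k (acc.2.getD k 0), acc.2)
        else
          (dfsCollect (ks.length + 1) adj fd [k] (PySem.Set.ofList [k]) 0).map fun se =>
            -- for m in seen: comp_sum[m] = total   (comp_sum is only looked up afterwards)
            let cs := se.1.foldl (fun c m => c.insert m se.2) acc.2
            (acc.1.insert k (cs.getD k 0), cs))
        (some ((PySem.Dict.empty : PySem.Dict String Int), (PySem.Dict.empty : PySem.Dict String Int))) with
    | none => []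
    | some (res, _) => res.items

-- ===== PRECONDITION & SPEC =====
-- Pre_ excludes exactly the inputs where A raises KeyError: a synonym endpoint absent from freq
-- (B raises the same KeyError there).
def Pre_baby_names (freq : List (String × Int)) (synonyms : List (String × String)) : Prop :=
  ∀ pr ∈ synonyms, pr.1 ∈ freq.map Prod.fst ∧ pr.2 ∈ freq.map Prod.fst

instance (freq : List (String × Int)) (synonyms : List (String × String)) : Decidable (Pre_baby_names freq synonyms) := by
  unfold Pre_baby_names; infer_instance

def pvWitness_baby_names : (List (String × Int)) × (List (String × String)) :=
  ([("john", 15), ("jon", 12), ("chris", 13), ("kris", 4), ("christopher", 19)],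
   [("jon", "john"), ("chris", "kris"), ("chris", "christopher")])

def Spec_baby_names (freq : List (String × Int)) (synonyms : List (String × String)) (out : List (String × Int)) : Prop := out = baby_names_alt freq synonyms
instance (freq : List (String × Int)) (synonyms : List (String × String)) (out : List (String × Int)) : Decidable (Spec_baby_names freq synonyms out) := by unfold Spec_baby_names; infer_instance

-- ===== CLAIM (what is proved, stated in full; the proofs are below) =====
def Claim_equal_baby_names : Prop := ∀ (freq : List (String × Int)) (synonyms : List (String × String)), Dom_baby_names freq synonyms → Pre_baby_names freq synonyms → Spec_baby_names freq synonyms (baby_names freq synonyms)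

-- ===== LEMMAS AND PROOFS =====

-- root-chasing infrastructure for the union-find side
def pstep (p : PySem.Dict String String) (x : String) : String := (p.get? x).getD x

def rootIter : Nat → PySem.Dict String String → String → String
  | 0, _, x => x
  | n + 1, p, x => if pstep p x = x then x else rootIter n p (pstep p x)

def IsRootP (p : PySem.Dict String String) (x : String) : Prop := pstep p x = x

def RootOf (p : PySem.Dict String String) (x r : String) : Prop :=
  ∃ n, rootIter n p x = r ∧ IsRootP p r

def ClosedP (ks : List String) (p : PySem.Dict String String) : Prop :=
  (∀ x, (p.get? x).isSome = true ↔ x ∈ ks) ∧ (∀ x y, p.get? x = some y → y ∈ ks)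

def BndP (ks : List String) (p : PySem.Dict String String) (n : Nat) : Prop :=
  ∀ x ∈ ks, IsRootP p (rootIter n p x)

def Agrees (p p' : PySem.Dict String String) : Prop :=
  ∀ y k, IsRootP p (rootIter k p y) →
    rootIter k p' y = rootIter k p y ∧ IsRootP p' (rootIter k p y)

def SameC (p : PySem.Dict String String) (x y : String) : Prop :=
  ∃ r, RootOf p x r ∧ RootOf p y r

lemma rootIter_of_root (p : PySem.Dict String String) (x : String) (h : IsRootP p x) :
    ∀ n, rootIter n p x = x := by
  intro n; induction n with
  | zero => rfl
  | succ n ih => simp [rootIter, IsRootP] at h ⊢; simp [h]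

lemma rootIter_stab (p : PySem.Dict String String) :
    ∀ n x, IsRootP p (rootIter n p x) → ∀ m, n ≤ m → rootIter m p x = rootIter n p x := by
  intro n
  induction n with
  | zero =>
    intro x h m _
    exact rootIter_of_root p x h m
  | succ n ih =>
    intro x h m hm
    by_cases hx : pstep p x = x
    · rw [rootIter_of_root p x hx, rootIter_of_root p x hx]
    · obtain ⟨m', rfl⟩ : ∃ m', m = m' + 1 := ⟨m - 1, by omega⟩
      have hstep : rootIter (n+1) p x = rootIter n p (pstep p x) := by
        simp [rootIter, hx]
      rw [hstep] at h ⊢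
      have : rootIter (m'+1) p x = rootIter m' p (pstep p x) := by
        simp [rootIter, hx]
      rw [this]
      exact ih (pstep p x) h m' (by omega)

lemma rootof_unique (p : PySem.Dict String String) (x r r' : String)
    (h1 : RootOf p x r) (h2 : RootOf p x r') : r = r' := by
  obtain ⟨n, hn, hr⟩ := h1
  obtain ⟨m, hm, hr'⟩ := h2
  rcases le_total n m with h | h
  · rw [← hn, ← hm, rootIter_stab p n x (hn ▸ hr) m h]
  · rw [← hn, ← hm, rootIter_stab p m x (hm ▸ hr') n h]

lemma rootof_self (p : PySem.Dict String String) (x : String) (h : IsRootP p x) : RootOf p x x :=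
  ⟨0, rfl, h⟩

lemma rootIter_mem (ks : List String) (p : PySem.Dict String String) (hC : ClosedP ks p) :
    ∀ n x, x ∈ ks → rootIter n p x ∈ ks := by
  intro n
  induction n with
  | zero => intro x hx; exact hx
  | succ n ih =>
    intro x hx
    by_cases hs : pstep p x = x
    · simpa [rootIter, hs] using hx
    · have : rootIter (n+1) p x = rootIter n p (pstep p x) := by simp [rootIter, hs]
      rw [this]
      apply ih
      have hsome : (p.get? x).isSome = true := (hC.1 x).2 hx
      obtain ⟨y, hy⟩ := Option.isSome_iff_exists.1 hsome
      have : pstep p x = y := by simp [pstep, hy]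
      rw [this]; exact hC.2 x y hy
lemma rootof_mem (ks : List String) (p : PySem.Dict String String) (hC : ClosedP ks p)
    (x r : String) (hx : x ∈ ks) (h : RootOf p x r) : r ∈ ks := by
  obtain ⟨n, hn, _⟩ := h; exact hn ▸ rootIter_mem ks p hC n x hx

lemma bnd_rooted (ks : List String) (p : PySem.Dict String String) (n : Nat)
    (hB : BndP ks p n) (x : String) (hx : x ∈ ks) : RootOf p x (rootIter n p x) :=
  ⟨n, rfl, hB x hx⟩

lemma bnd_mono (ks : List String) (p : PySem.Dict String String) (n m : Nat)
    (hB : BndP ks p n) (h : n ≤ m) : BndP ks p m := by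
  intro x hx
  rw [rootIter_stab p n x (hB x hx) m h]
  exact hB x hx

lemma pstep_insert (p : PySem.Dict String String) (k v x : String) :
    pstep (p.insert k v) x = if x = k then v else pstep p x := by
  simp only [pstep, PySem.Dict.get?_insert]
  split <;> simp

lemma agrees_refl (p : PySem.Dict String String) : Agrees p p := fun _ _ h => ⟨rfl, h⟩

lemma agrees_trans (p p1 p2 : PySem.Dict String String) (h1 : Agrees p p1) (h2 : Agrees p1 p2) :
    Agrees p p2 := by
  intro y k hk
  obtain ⟨he, hr⟩ := h1 y k hk
  have hk1 : IsRootP p1 (rootIter k p1 y) := he ▸ hr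
  obtain ⟨he2, hr2⟩ := h2 y k hk1
  rw [he] at he2 hr2
  exact ⟨he2, hr2⟩

lemma agrees_rootof (p p' : PySem.Dict String String) (h : Agrees p p') (y r : String)
    (hr : RootOf p y r) : RootOf p' y r := by
  obtain ⟨n, hn, hroot⟩ := hr
  obtain ⟨he, hr'⟩ := h y n (hn ▸ hroot)
  exact ⟨n, he.trans hn, hn ▸ hr'⟩

lemma agrees_bnd (ks : List String) (p p' : PySem.Dict String String) (n : Nat)
    (h : Agrees p p') (hB : BndP ks p n) : BndP ks p' n := by
  intro x hx
  obtain ⟨he, hr⟩ := h x n (hB x hx)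
  exact he ▸ (hr)

lemma sameC_iff_root_eq (ks : List String) (p : PySem.Dict String String) (n : Nat)
    (hB : BndP ks p n) (x y : String) (hx : x ∈ ks) (hy : y ∈ ks) :
    SameC p x y ↔ rootIter n p x = rootIter n p y := by
  constructor
  · rintro ⟨r, h1, h2⟩
    rw [rootof_unique p x (rootIter n p x) r (bnd_rooted ks p n hB x hx) h1,
        rootof_unique p y (rootIter n p y) r (bnd_rooted ks p n hB y hy) h2]
  · intro h
    exact ⟨rootIter n p y, h ▸ bnd_rooted ks p n hB x hx, bnd_rooted ks p n hB y hy⟩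

lemma agrees_sameC (ks : List String) (p p' : PySem.Dict String String) (n : Nat)
    (hA : Agrees p p') (hB : BndP ks p n) (x y : String) (hx : x ∈ ks) (hy : y ∈ ks) :
    SameC p' x y ↔ SameC p x y := by
  constructor
  · rintro ⟨r, h1, h2⟩
    have hx' := agrees_rootof p p' hA x _ (bnd_rooted ks p n hB x hx)
    have hy' := agrees_rootof p p' hA y _ (bnd_rooted ks p n hB y hy)
    have e1 : r = rootIter n p x := rootof_unique p' x r (rootIter n p x) h1 hx'
    have e2 : r = rootIter n p y := rootof_unique p' y r (rootIter n p y) h2 hy'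
    exact (sameC_iff_root_eq ks p n hB x y hx hy).2 (e1 ▸ e2)
  · rintro ⟨r, h1, h2⟩
    exact ⟨r, agrees_rootof p p' hA x r h1, agrees_rootof p p' hA y r h2⟩

lemma closed_insert (ks : List String) (p : PySem.Dict String String) (k v : String)
    (hC : ClosedP ks p) (hk : k ∈ ks) (hv : v ∈ ks) : ClosedP ks (p.insert k v) := by
  constructor
  · intro x
    rw [PySem.Dict.get?_insert]
    split
    · rename_i h; subst h; simpa using hk
    · exact hC.1 x
  · intro x y
    rw [PySem.Dict.get?_insert]
    split
    · rintro ⟨rfl⟩; exact hv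
    · exact hC.2 x y

lemma repoint_agree (ks : List String) (p : PySem.Dict String String) (x r : String)
    (hC : ClosedP ks p) (hx : x ∈ ks) (hr : RootOf p x r) :
    Agrees p (p.insert x r) ∧ ClosedP ks (p.insert x r) := by
  have hrk : r ∈ ks := rootof_mem ks p hC x r hx hr
  have hrroot : IsRootP p r := hr.choose_spec.2
  refine ⟨?_, closed_insert ks p x r hC hx hrk⟩
  intro y k
  induction k generalizing y with
  | zero =>
    intro hk
    refine ⟨rfl, ?_⟩
    simp only [rootIter] at hk ⊢
    by_cases hyx : y = x
    · subst hyx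
      have : r = y := rootof_unique p y r y hr (rootof_self p y hk)
      subst this
      simpa [IsRootP, pstep_insert] using hk
    · simpa [IsRootP, pstep_insert, hyx] using hk
  | succ k ih =>
    intro hk
    by_cases hy : pstep p y = y
    · rw [rootIter_of_root p y hy] at hk ⊢
      have hroot' : IsRootP (p.insert x r) y := by
        by_cases hyx : y = x
        · subst hyx
          have : r = y := rootof_unique p y r y hr (rootof_self p y hy)
          subst this
          simpa [IsRootP, pstep_insert] using hy
        · simpa [IsRootP, pstep_insert, hyx] using hy
      exact ⟨rootIter_of_root _ y hroot' (k+1), hroot'⟩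
    · have hstep : rootIter (k+1) p y = rootIter k p (pstep p y) := by simp [rootIter, hy]
      by_cases hyx : y = x
      · subst hyx
        have hrney : r ≠ y := by
          intro h; subst h; exact hy hrroot
        have hval : rootIter (k+1) p y = r :=
          rootof_unique p y _ r ⟨k+1, rfl, hk⟩ hr
        have hstep' : pstep (p.insert y r) y = r := by simp [pstep_insert]
        have hLHS : rootIter (k+1) (p.insert y r) y = r := by
          have : rootIter (k+1) (p.insert y r) y = rootIter k (p.insert y r) (pstep (p.insert y r) y) := by
            simp only [rootIter]
            rw [hstep']
            simp [hrney]
          rw [this, hstep']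
          have hrr : IsRootP (p.insert y r) r := by
            simpa [IsRootP, pstep_insert, hrney] using hrroot
          exact rootIter_of_root _ r hrr k
        refine ⟨by rw [hLHS, hval], ?_⟩
        rw [hval]
        simpa [IsRootP, pstep_insert, hrney] using hrroot
      · rw [hstep] at hk ⊢
        have hstep2 : rootIter (k+1) (p.insert x r) y = rootIter k (p.insert x r) (pstep p y) := by
          have hps : pstep (p.insert x r) y = pstep p y := by simp [pstep_insert, hyx]
          simp only [rootIter]
          rw [hps]
          simp [hy]
        rw [hstep2]
        exact ih (pstep p y) hk

lemma find_spec (ks : List String) :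
    ∀ (fuel : Nat) (p : PySem.Dict String String) (x : String) (n : Nat),
    ClosedP ks p → x ∈ ks → IsRootP p (rootIter n p x) → n < fuel →
    ∃ p', ufFind fuel p x = some (rootIter n p x, p') ∧ ClosedP ks p' ∧ Agrees p p' := by
  intro fuel
  induction fuel with
  | zero => intro p x n _ _ _ h; omega
  | succ fuel ih =>
    intro p x n hC hx hn hfuel
    have hsome : (p.get? x).isSome = true := (hC.1 x).2 hx
    obtain ⟨px, hpx⟩ := Option.isSome_iff_exists.1 hsome
    have hpxstep : pstep p x = px := by simp [pstep, hpx]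
    by_cases hxx : px = x
    · have hroot : IsRootP p x := by rw [IsRootP, hpxstep]; exact hxx
      refine ⟨p, ?_, hC, agrees_refl p⟩
      rw [rootIter_of_root p x hroot n]
      simp [ufFind, hpx, hxx]
    · obtain ⟨m, rfl⟩ : ∃ m, n = m + 1 := by
        rcases n with _ | m
        · exfalso; apply hxx
          simpa [IsRootP, rootIter, hpxstep] using hn
        · exact ⟨m, rfl⟩
      have hrw : rootIter (m+1) p x = rootIter m p px := by
        simp [rootIter, hpxstep, hxx]
      rw [hrw] at hn ⊢
      have hpxks : px ∈ ks := hC.2 x px hpx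
      obtain ⟨p1, hfind, hC1, hAg1⟩ := ih p px m hC hpxks hn (by omega)
      have hrootof : RootOf p1 x (rootIter m p px) := by
        apply agrees_rootof p p1 hAg1
        exact ⟨m+1, hrw, hn⟩
      obtain ⟨hAg2, hC2⟩ := repoint_agree ks p1 x (rootIter m p px) hC1 hx hrootof
      refine ⟨p1.insert x (rootIter m p px), ?_, hC2, agrees_trans _ _ _ hAg1 hAg2⟩
      simp [ufFind, hpx, hxx, hfind]

lemma link_iter (p : PySem.Dict String String) (ra rb : String)
    (hra : IsRootP p ra) (hrb : IsRootP p rb) (hne : ra ≠ rb) :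
    ∀ k y, IsRootP p (rootIter k p y) →
      rootIter (k+1) (p.insert rb ra) y = (if rootIter k p y = rb then ra else rootIter k p y) ∧
      IsRootP (p.insert rb ra) (if rootIter k p y = rb then ra else rootIter k p y) := by
  have hra' : IsRootP (p.insert rb ra) ra := by
    simpa [IsRootP, pstep_insert, hne] using hra
  have hroot' : ∀ w, IsRootP p w → w ≠ rb → IsRootP (p.insert rb ra) w := by
    intro w hw hwne
    simpa [IsRootP, pstep_insert, hwne] using hw
  have hbase : ∀ k y, IsRootP p y →
      rootIter (k+1) (p.insert rb ra) y = (if y = rb then ra else y) ∧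
      IsRootP (p.insert rb ra) (if y = rb then ra else y) := by
    intro k y hy
    by_cases hyrb : y = rb
    · subst hyrb
      have h1 : pstep (p.insert y ra) y = ra := by simp [pstep_insert]
      refine ⟨?_, by simpa using hra'⟩
      have h2 : rootIter (k+1) (p.insert y ra) y = rootIter k (p.insert y ra) ra := by
        simp [rootIter, h1, hne]
      rw [h2, rootIter_of_root _ ra hra' k]
      simp
    · have h1 : IsRootP (p.insert rb ra) y := hroot' y hy hyrb
      simp only [if_neg hyrb]
      exact ⟨rootIter_of_root _ y h1 _, h1⟩
  intro k
  induction k with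
  | zero =>
    intro y hy
    have hy' : IsRootP p y := hy
    have := hbase 0 y hy'
    simpa [rootIter] using this
  | succ k ih =>
    intro y hy
    by_cases hys : pstep p y = y
    · rw [rootIter_of_root p y hys] at hy ⊢
      exact hbase (k+1) y hys
    · have hyrb : y ≠ rb := by intro h; subst h; exact hys hrb
      have hstepy : pstep (p.insert rb ra) y = pstep p y := by simp [pstep_insert, hyrb]
      have h2 : rootIter (k+1) p y = rootIter k p (pstep p y) := by simp [rootIter, hys]
      rw [h2] at hy ⊢
      have h3 : rootIter (k+1+1) (p.insert rb ra) y = rootIter (k+1) (p.insert rb ra) (pstep p y) := by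
        have h4 : rootIter (k+1+1) (p.insert rb ra) y =
            if pstep (p.insert rb ra) y = y then y else rootIter (k+1) (p.insert rb ra) (pstep (p.insert rb ra) y) := rfl
        rw [h4, hstepy]
        simp [hys]
      rw [h3]
      exact ih (pstep p y) hy

lemma link_spec (ks : List String) (p : PySem.Dict String String) (ra rb : String) (n : Nat)
    (hC : ClosedP ks p) (hB : BndP ks p n)
    (hra : IsRootP p ra) (hrb : IsRootP p rb) (hne : ra ≠ rb)
    (hrak : ra ∈ ks) (hrbk : rb ∈ ks) :
    ClosedP ks (p.insert rb ra) ∧ BndP ks (p.insert rb ra) (n+1) ∧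
    (∀ y r, RootOf p y r → RootOf (p.insert rb ra) y (if r = rb then ra else r)) := by
  refine ⟨closed_insert ks p rb ra hC hrbk hrak, ?_, ?_⟩
  · intro x hx
    obtain ⟨he, hr⟩ := link_iter p ra rb hra hrb hne n x (hB x hx)
    rw [he]; exact hr
  · rintro y r ⟨m, hm, hr⟩
    obtain ⟨he, hroot⟩ := link_iter p ra rb hra hrb hne m y (hm ▸ hr)
    rw [hm] at he hroot
    exact ⟨m+1, he, hroot⟩

lemma link_formula (pu pv rx ry : String) (hne : pu ≠ pv) :
    ((if rx = pu then pv else rx) = (if ry = pu then pv else ry)) ↔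
      (rx = ry ∨ (rx = pu ∧ ry = pv) ∨ (rx = pv ∧ ry = pu)) := by
  by_cases h1 : rx = pu <;> by_cases h2 : ry = pu <;>
    simp [h1, h2, hne, Ne.symm hne] <;> tauto

lemma rankok_insert (ks : List String) (rank : PySem.Dict String Int) (k : String) (v : Int)
    (h : ∀ x ∈ ks, ((rank.get? x).isSome = true)) :
    ∀ x ∈ ks, (((rank.insert k v).get? x).isSome = true) := by
  intro x hx
  rw [PySem.Dict.get?_insert]
  split
  · simp
  · exact h x hx

lemma union_spec (ks : List String) (fuel : Nat) (p : PySem.Dict String String)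
    (rank : PySem.Dict String Int) (a b : String) (n : Nat)
    (hC : ClosedP ks p) (hB : BndP ks p n) (hRk : ∀ x ∈ ks, ((rank.get? x).isSome = true))
    (ha : a ∈ ks) (hb : b ∈ ks) (hfuel : n < fuel) :
    ∃ p' rank', ufUnion fuel p rank a b = some (p', rank') ∧ ClosedP ks p' ∧
      BndP ks p' (n+1) ∧ (∀ x ∈ ks, ((rank'.get? x).isSome = true)) ∧
      ∀ x ∈ ks, ∀ y ∈ ks,
        (SameC p' x y ↔ (SameC p x y ∨ (SameC p x a ∧ SameC p y b) ∨ (SameC p x b ∧ SameC p y a))) := by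
  obtain ⟨p1, hfind1, hC1, hAg1⟩ := find_spec ks fuel p a n hC ha (hB a ha) hfuel
  have hB1 : BndP ks p1 n := agrees_bnd ks p p1 n hAg1 hB
  obtain ⟨p2, hfind2, hC2, hAg2⟩ := find_spec ks fuel p1 b n hC1 hb (hB1 b hb) hfuel
  have hB2 : BndP ks p2 n := agrees_bnd ks p1 p2 n hAg2 hB1
  have hAg12 : Agrees p p2 := agrees_trans _ _ _ hAg1 hAg2
  set pa := rootIter n p a with hpa
  set pb := rootIter n p1 b with hpb
  -- roots of a, b in the original p
  have hRa : RootOf p a pa := bnd_rooted ks p n hB a ha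
  have hRb1 : RootOf p1 b pb := bnd_rooted ks p1 n hB1 b hb
  have hRbp : RootOf p b pb := by
    have h1 : RootOf p1 b (rootIter n p b) := agrees_rootof p p1 hAg1 b _ (bnd_rooted ks p n hB b hb)
    have : rootIter n p b = pb := rootof_unique p1 b _ _ h1 hRb1
    exact this ▸ bnd_rooted ks p n hB b hb
  have hRa2 : RootOf p2 a pa := agrees_rootof p p2 hAg12 a pa hRa
  have hRb2 : RootOf p2 b pb := agrees_rootof p1 p2 hAg2 b pb hRb1
  have hpaks : pa ∈ ks := rootof_mem ks p hC a pa ha hRa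
  have hpbks : pb ∈ ks := rootof_mem ks p hC b pb hb hRbp
  -- helper: SameC p x c ↔ rootIter n p2 x = root of c, for c's root rc
  have hrootx : ∀ x ∈ ks, RootOf p2 x (rootIter n p2 x) := fun x hx => bnd_rooted ks p2 n hB2 x hx
  have hsameCa : ∀ x ∈ ks, (SameC p x a ↔ rootIter n p2 x = pa) := by
    intro x hx
    rw [← agrees_sameC ks p p2 n hAg12 hB x a hx ha]
    constructor
    · rintro ⟨r, h1, h2⟩
      rw [← rootof_unique p2 x r (rootIter n p2 x) h1 (hrootx x hx)]
      exact rootof_unique p2 a r pa h2 hRa2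
    · intro h
      exact ⟨pa, h ▸ hrootx x hx, hRa2⟩
  have hsameCb : ∀ x ∈ ks, (SameC p x b ↔ rootIter n p2 x = pb) := by
    intro x hx
    rw [← agrees_sameC ks p p2 n hAg12 hB x b hx hb]
    constructor
    · rintro ⟨r, h1, h2⟩
      rw [← rootof_unique p2 x r (rootIter n p2 x) h1 (hrootx x hx)]
      exact rootof_unique p2 b r pb h2 hRb2
    · intro h
      exact ⟨pb, h ▸ hrootx x hx, hRb2⟩
  have hsameCxy : ∀ x ∈ ks, ∀ y ∈ ks, (SameC p x y ↔ rootIter n p2 x = rootIter n p2 y) := by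
    intro x hx y hy
    rw [← agrees_sameC ks p p2 n hAg12 hB x y hx hy]
    exact sameC_iff_root_eq ks p2 n hB2 x y hx hy
  by_cases hab : pa = pb
  · -- px == py: return unchanged
    refine ⟨p2, rank, ?_, hC2, bnd_mono ks p2 n (n+1) hB2 (by omega), hRk, ?_⟩
    · simp [ufUnion, hfind1, hfind2, ← hpa, ← hpb, hab]
    · intro x hx y hy
      rw [agrees_sameC ks p p2 n hAg12 hB x y hx hy]
      constructor
      · exact fun h => Or.inl h
      · rintro (h | ⟨h1, h2⟩ | ⟨h1, h2⟩)
        · exact h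
        · rw [hsameCa x hx] at h1
          rw [hsameCb y hy] at h2
          rw [hsameCxy x hx y hy, h1, h2, hab]
        · rw [hsameCb x hx] at h1
          rw [hsameCa y hy] at h2
          rw [hsameCxy x hx y hy, h1, h2, hab]
  · -- distinct roots: link according to rank
    obtain ⟨rx, hrx⟩ := Option.isSome_iff_exists.1 (hRk pa hpaks)
    obtain ⟨ry, hry⟩ := Option.isSome_iff_exists.1 (hRk pb hpbks)
    have hraroot : IsRootP p2 pa := hRa2.choose_spec.2
    have hrbroot : IsRootP p2 pb := hRb2.choose_spec.2
    -- generic conclusion for either orientation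
    have main : ∀ (pu pv : String), pu ≠ pv →
        ((pu = pa ∧ pv = pb) ∨ (pu = pb ∧ pv = pa)) →
        (ClosedP ks (p2.insert pu pv) ∧ BndP ks (p2.insert pu pv) (n+1) ∧
         ∀ x ∈ ks, ∀ y ∈ ks,
          (SameC (p2.insert pu pv) x y ↔
            (SameC p x y ∨ (SameC p x a ∧ SameC p y b) ∨ (SameC p x b ∧ SameC p y a)))) := by
      intro pu pv hpne hor
      have hpuk : pu ∈ ks := by rcases hor with ⟨rfl, _⟩ | ⟨rfl, _⟩ <;> assumption
      have hpvk : pv ∈ ks := by rcases hor with ⟨_, rfl⟩ | ⟨_, rfl⟩ <;> assumption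
      have hpuroot : IsRootP p2 pu := by rcases hor with ⟨rfl, _⟩ | ⟨rfl, _⟩ <;> assumption
      have hpvroot : IsRootP p2 pv := by rcases hor with ⟨_, rfl⟩ | ⟨_, rfl⟩ <;> assumption
      obtain ⟨hC', hB', hT⟩ := link_spec ks p2 pv pu n hC2 hB2 hpvroot hpuroot (Ne.symm hpne) hpvk hpuk
      refine ⟨hC', hB', ?_⟩
      intro x hx y hy
      have hTx := hT x _ (hrootx x hx)
      have hTy := hT y _ (hrootx y hy)
      have hiff : SameC (p2.insert pu pv) x y ↔
          ((if rootIter n p2 x = pu then pv else rootIter n p2 x) =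
           (if rootIter n p2 y = pu then pv else rootIter n p2 y)) := by
        constructor
        · rintro ⟨r, h1, h2⟩
          rw [← rootof_unique _ x r _ h1 hTx]
          exact rootof_unique _ y r _ h2 hTy
        · intro h
          exact ⟨_, hTx, h ▸ hTy⟩
      rw [hiff, link_formula pu pv _ _ hpne]
      rw [hsameCxy x hx y hy, hsameCa x hx, hsameCa y hy, hsameCb x hx, hsameCb y hy]
      rcases hor with ⟨rfl, rfl⟩ | ⟨rfl, rfl⟩
      · tauto
      · tauto
    by_cases h1 : rx < ry
    · obtain ⟨hC', hB', hrel⟩ := main pa pb hab (Or.inl ⟨rfl, rfl⟩)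
      refine ⟨p2.insert pa pb, rank, ?_, hC', hB', hRk, hrel⟩
      simp [ufUnion, hfind1, hfind2, ← hpa, ← hpb, hab, hrx, hry, h1]
    · by_cases h2 : rx > ry
      · obtain ⟨hC', hB', hrel⟩ := main pb pa (Ne.symm hab) (Or.inr ⟨rfl, rfl⟩)
        refine ⟨p2.insert pb pa, rank, ?_, hC', hB', hRk, hrel⟩
        simp [ufUnion, hfind1, hfind2, ← hpa, ← hpb, hab, hrx, hry, h1, h2]
      · obtain ⟨hC', hB', hrel⟩ := main pb pa (Ne.symm hab) (Or.inr ⟨rfl, rfl⟩)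
        refine ⟨p2.insert pb pa, rank.insert pa (rx + 1), ?_, hC', hB',
          rankok_insert ks rank pa (rx+1) hRk, hrel⟩
        simp [ufUnion, hfind1, hfind2, ← hpa, ← hpb, hab, hrx, hry, h1, h2]

def ERel (syn : List (String × String)) : String → String → Prop :=
  Relation.EqvGen (fun u v => (u, v) ∈ syn ∨ (v, u) ∈ syn)

lemma erel_refl (syn : List (String × String)) (x : String) : ERel syn x x :=
  Relation.EqvGen.refl x
lemma erel_symm (syn : List (String × String)) (x y : String) (h : ERel syn x y) : ERel syn y x :=
  Relation.EqvGen.symm x y h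
lemma erel_trans (syn : List (String × String)) (x y z : String)
    (h1 : ERel syn x y) (h2 : ERel syn y z) : ERel syn x z :=
  Relation.EqvGen.trans x y z h1 h2

lemma erel_nil (x y : String) : ERel [] x y ↔ x = y := by
  constructor
  · intro h
    induction h with
    | rel u v h => simp at h
    | refl u => rfl
    | symm u v _ ih => exact ih.symm
    | trans u v w _ _ ih1 ih2 => exact ih1.trans ih2
  · rintro rfl; exact erel_refl [] x

lemma erel_mono (s : List (String × String)) (pr : String × String) (x y : String)
    (h : ERel s x y) : ERel (s ++ [pr]) x y := by
  induction h with
  | rel u v h => exact Relation.EqvGen.rel u v (by rcases h with h | h; exacts [Or.inl (by simp [h]), Or.inr (by simp [h])])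
  | refl u => exact Relation.EqvGen.refl u
  | symm u v _ ih => exact Relation.EqvGen.symm u v ih
  | trans u v w _ _ ih1 ih2 => exact Relation.EqvGen.trans u v w ih1 ih2

lemma erel_snoc (s : List (String × String)) (a b x y : String) :
    ERel (s ++ [(a, b)]) x y ↔
      (ERel s x y ∨ (ERel s x a ∧ ERel s y b) ∨ (ERel s x b ∧ ERel s y a)) := by
  constructor
  · intro h
    induction h with
    | rel u v h =>
      rcases h with h | h <;> rw [List.mem_append] at h
      · rcases h with h | h
        · exact Or.inl (Relation.EqvGen.rel u v (Or.inl h))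
        · simp at h
          obtain ⟨rfl, rfl⟩ := h
          exact Or.inr (Or.inl ⟨erel_refl s u, erel_refl s v⟩)
      · rcases h with h | h
        · exact Or.inl (Relation.EqvGen.rel u v (Or.inr h))
        · simp at h
          obtain ⟨rfl, rfl⟩ := h
          exact Or.inr (Or.inr ⟨erel_refl s u, erel_refl s v⟩)
    | refl u => exact Or.inl (erel_refl s u)
    | symm u v _ ih =>
      rcases ih with h | ⟨h1, h2⟩ | ⟨h1, h2⟩
      · exact Or.inl (erel_symm s u v h)
      · exact Or.inr (Or.inr ⟨h2, h1⟩)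
      · exact Or.inr (Or.inl ⟨h2, h1⟩)
    | trans u v w _ _ ih1 ih2 =>
      rcases ih1 with h | ⟨h1, h2⟩ | ⟨h1, h2⟩ <;> rcases ih2 with g | ⟨g1, g2⟩ | ⟨g1, g2⟩
      · exact Or.inl (erel_trans s u v w h g)
      · exact Or.inr (Or.inl ⟨erel_trans s u v a h g1, g2⟩)
      · exact Or.inr (Or.inr ⟨erel_trans s u v b h g1, g2⟩)
      · exact Or.inr (Or.inl ⟨h1, erel_trans s w v b (erel_symm s v w g) h2⟩)
      · -- u~a, v~b, v~a, w~b : then a~b in s, so u ~ w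
        exact Or.inl (erel_trans s u a w (erel_trans s u a a h1 (erel_refl s a))
          (erel_trans s a v w (erel_symm s v a g1)
            (erel_trans s v b w (erel_trans s v b b h2 (erel_refl s b)) (erel_symm s w b g2))))
      · -- u~a, v~b, v~b, w~a
        exact Or.inl (erel_trans s u a w h1 (erel_symm s w a g2))
      · exact Or.inr (Or.inr ⟨h1, erel_trans s w v a (erel_symm s v w g) h2⟩)
      · -- u~b, v~a, v~a, w~b
        exact Or.inl (erel_trans s u b w h1 (erel_symm s w b g2))
      · -- u~b, v~a, v~b, w~a : b~v~... v~a ∧ w~a gives v~w; u~b~v via h2? h2 : v ~ a? wait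
        exact Or.inl (erel_trans s u b w
          (erel_trans s u b b h1 (erel_refl s b))
          (erel_trans s b v w (erel_symm s v b g1) (erel_trans s v a w h2 (erel_symm s w a g2))))
  · rintro (h | ⟨h1, h2⟩ | ⟨h1, h2⟩)
    · exact erel_mono s (a, b) x y h
    · exact erel_trans _ x a y (erel_mono s _ x a h1)
        (erel_trans _ a b y (Relation.EqvGen.rel a b (Or.inl (by simp)))
          (erel_symm _ y b (erel_mono s _ y b h2)))
    · exact erel_trans _ x b y (erel_mono s _ x b h1)
        (erel_trans _ b a y (Relation.EqvGen.rel b a (Or.inr (by simp)))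
          (erel_symm _ y a (erel_mono s _ y a h2)))

-- the initial dicts: foldl-insert with a per-key value
lemma foldl_insert_get? {ν : Type} (g : String → ν) :
    ∀ (ms : List String) (d : PySem.Dict String ν) (x : String),
      ((ms.foldl (fun d k => d.insert k (g k)) d).get? x) = if x ∈ ms then some (g x) else d.get? x := by
  intro ms
  induction ms with
  | nil => intro d x; simp
  | cons m rest ih =>
    intro d x
    rw [List.foldl_cons, ih]
    by_cases hx : x ∈ rest
    · simp [hx]
    · rw [PySem.Dict.get?_insert]
      by_cases hxm : x = m
      · subst hxm; simp [hx]
      · simp [hx, hxm, List.mem_cons]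

lemma unions_spec (ks : List String) (fuel : Nat) :
    ∀ (s : List (String × String)), (∀ pr ∈ s, pr.1 ∈ ks ∧ pr.2 ∈ ks) → s.length + 1 ≤ fuel →
    ∃ p rank,
      s.foldl (fun st? pr => st?.bind fun st => ufUnion fuel st.1 st.2 pr.1 pr.2)
        (some (ks.foldl (fun d k => d.insert k k) PySem.Dict.empty,
               ks.foldl (fun d k => d.insert k (0 : Int)) PySem.Dict.empty)) = some (p, rank) ∧
      ClosedP ks p ∧ BndP ks p (s.length + 1) ∧ (∀ x ∈ ks, ((rank.get? x).isSome = true)) ∧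
      ∀ x ∈ ks, ∀ y ∈ ks, (SameC p x y ↔ ERel s x y) := by
  intro s
  induction s using List.reverseRecOn with
  | nil =>
    intro _ _
    refine ⟨_, _, rfl, ?_, ?_, ?_, ?_⟩
    · constructor
      · intro x
        rw [foldl_insert_get? (fun k => k) ks PySem.Dict.empty x]
        split <;> simp_all
      · intro x y
        rw [foldl_insert_get? (fun k => k) ks PySem.Dict.empty x]
        split
        · rintro ⟨rfl⟩; assumption
        · simp
    · intro x hx
      have hroot : IsRootP (ks.foldl (fun d k => d.insert k k) PySem.Dict.empty) x := by
        simp [IsRootP, pstep, foldl_insert_get? (fun k => k) ks _ x, hx]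
      rw [rootIter_of_root _ x hroot]
      exact hroot
    · intro x hx
      rw [foldl_insert_get? (fun _ => (0:Int)) ks PySem.Dict.empty x]
      simp [hx]
    · intro x hx y hy
      rw [erel_nil]
      have hrx : IsRootP (ks.foldl (fun d k => d.insert k k) PySem.Dict.empty) x := by
        simp [IsRootP, pstep, foldl_insert_get? (fun k => k) ks _ x, hx]
      have hry : IsRootP (ks.foldl (fun d k => d.insert k k) PySem.Dict.empty) y := by
        simp [IsRootP, pstep, foldl_insert_get? (fun k => k) ks _ y, hy]
      constructor
      · rintro ⟨r, h1, h2⟩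
        have e1 := rootof_unique _ x x r (rootof_self _ x hrx) h1
        have e2 := rootof_unique _ y y r (rootof_self _ y hry) h2
        exact e1.trans e2.symm
      · rintro rfl
        exact ⟨x, rootof_self _ x hrx, rootof_self _ x hrx⟩
  | append_singleton s pr ih =>
    intro hmem hlen
    obtain ⟨p, rank, hfold, hC, hB, hRk, hrel⟩ :=
      ih (fun q hq => hmem q (by simp [hq])) (by simp at hlen ⊢; omega)
    have hpr := hmem pr (by simp)
    obtain ⟨p', rank', hun, hC', hB', hRk', hrel'⟩ :=
      union_spec ks fuel p rank pr.1 pr.2 (s.length + 1) hC hB hRk hpr.1 hpr.2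
        (by simp at hlen; omega)
    refine ⟨p', rank', ?_, hC', by simpa using hB', hRk', ?_⟩
    · rw [List.foldl_append, hfold]
      simpa using hun
    · intro x hx y hy
      rw [hrel' x hx y hy, hrel x hx y hy, hrel x hx pr.1 hpr.1, hrel y hy pr.2 hpr.2,
          hrel x hx pr.2 hpr.2, hrel y hy pr.1 hpr.1,
          show s ++ [pr] = s ++ [(pr.1, pr.2)] from by simp]
      exact (erel_snoc s pr.1 pr.2 x y).symm

lemma gs_spec (ks : List String) (fuel NB : Nat) (fd : PySem.Dict String Int) (f : String → String)
    (hfb : NB < fuel) :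
    ∀ (ms : List String), (∀ m ∈ ms, m ∈ ks) →
    ∀ (p : PySem.Dict String String) (gs0 : PySem.Dict String Int),
      ClosedP ks p → BndP ks p NB → (∀ m ∈ ms, RootOf p m (f m)) →
    ∃ gs p1,
      ms.foldl (fun acc? k => acc?.bind fun acc =>
          (ufFind fuel acc.2 k).map fun rp =>
            (acc.1.insert rp.1 (acc.1.getD rp.1 0 + fd.getD k 0), rp.2)) (some (gs0, p)) = some (gs, p1) ∧
      ClosedP ks p1 ∧ BndP ks p1 NB ∧ Agrees p p1 ∧
      ∀ c, gs.getD c 0 = gs0.getD c 0 + ((ms.filter (fun m => f m == c)).map (fun m => fd.getD m 0)).sum := by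
  intro ms
  induction ms with
  | nil =>
    intro _ p gs0 hC hB _
    exact ⟨gs0, p, rfl, hC, hB, agrees_refl p, by simp⟩
  | cons m rest ih =>
    intro hmem p gs0 hC hB hroot
    have hm : m ∈ ks := hmem m (by simp)
    obtain ⟨p1, hfind, hC1, hAg1⟩ := find_spec ks fuel p m NB hC hm (hB m hm) hfb
    have hval : rootIter NB p m = f m :=
      rootof_unique p m _ _ (bnd_rooted ks p NB hB m hm) (hroot m (by simp))
    have hB1 : BndP ks p1 NB := agrees_bnd ks p p1 NB hAg1 hB
    have hroot1 : ∀ q ∈ rest, RootOf p1 q (f q) := fun q hq =>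
      agrees_rootof p p1 hAg1 q (f q) (hroot q (by simp [hq]))
    obtain ⟨gs, p2, hfold, hC2, hB2, hAg2, hsum⟩ :=
      ih (fun q hq => hmem q (by simp [hq])) p1
        (gs0.insert (f m) (gs0.getD (f m) 0 + fd.getD m 0)) hC1 hB1 hroot1
    refine ⟨gs, p2, ?_, hC2, hB2, agrees_trans _ _ _ hAg1 hAg2, ?_⟩
    · rw [List.foldl_cons]
      have : ((some (gs0, p)).bind fun acc =>
          (ufFind fuel acc.2 m).map fun rp =>
            (acc.1.insert rp.1 (acc.1.getD rp.1 0 + fd.getD m 0), rp.2)) =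
          some (gs0.insert (f m) (gs0.getD (f m) 0 + fd.getD m 0), p1) := by
        simp [hfind, hval]
      rw [this, hfold]
    · intro c
      rw [hsum c, PySem.Dict.getD_insert]
      by_cases hc : f m = c
      · simp only [List.filter_cons, hc]
        simp [hc]
        ring
      · have : (f m == c) = false := by simpa using hc
        simp only [List.filter_cons, this]
        simp [Ne.symm hc]

lemma res_spec (ks : List String) (fuel NB : Nat) (gs : PySem.Dict String Int) (f : String → String)
    (hfb : NB < fuel) :
    ∀ (ms : List String), (∀ m ∈ ms, m ∈ ks) → ms.Nodup →
    ∀ (p : PySem.Dict String String) (res0 : PySem.Dict String Int),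
      ClosedP ks p → BndP ks p NB → (∀ m ∈ ms, RootOf p m (f m)) →
      (∀ m ∈ ms, res0.contains m = false) →
    ∃ res p2,
      ms.foldl (fun acc? k => acc?.bind fun acc =>
          (ufFind fuel acc.2 k).map fun rp =>
            (acc.1.insert k (gs.getD rp.1 0), rp.2)) (some (res0, p)) = some (res, p2) ∧
      res.items = res0.items ++ ms.map (fun k => (k, gs.getD (f k) 0)) := by
  intro ms
  induction ms with
  | nil =>
    intro _ _ p res0 hC hB _ _
    exact ⟨res0, p, rfl, by simp⟩
  | cons m rest ih =>
    intro hmem hnd p res0 hC hB hroot hfresh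
    have hm : m ∈ ks := hmem m (by simp)
    obtain ⟨p1, hfind, hC1, hAg1⟩ := find_spec ks fuel p m NB hC hm (hB m hm) hfb
    have hval : rootIter NB p m = f m :=
      rootof_unique p m _ _ (bnd_rooted ks p NB hB m hm) (hroot m (by simp))
    have hB1 : BndP ks p1 NB := agrees_bnd ks p p1 NB hAg1 hB
    obtain ⟨res, p2, hfold, hitems⟩ :=
      ih (fun q hq => hmem q (by simp [hq])) hnd.of_cons p1
        (res0.insert m (gs.getD (f m) 0)) hC1 hB1
        (fun q hq => agrees_rootof p p1 hAg1 q (f q) (hroot q (by simp [hq])))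
        (by
          intro q hq
          rw [PySem.Dict.contains_insert]
          have hqm : q ≠ m := by rintro rfl; exact (List.nodup_cons.1 hnd).1 hq
          simp [hqm, hfresh q (by simp [hq])])
    refine ⟨res, p2, ?_, ?_⟩
    · rw [List.foldl_cons]
      have : ((some (res0, p)).bind fun acc =>
          (ufFind fuel acc.2 m).map fun rp => (acc.1.insert m (gs.getD rp.1 0), rp.2)) =
          some (res0.insert m (gs.getD (f m) 0), p1) := by
        simp [hfind, hval]
      rw [this, hfold]
    · rw [hitems, PySem.Dict.items_insert_of_not_contains res0 _ (hfresh m (by simp))]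
      simp

def AdjP (ks : List String) (adj : PySem.Dict String (List String)) (s : List (String × String)) : Prop :=
  (∀ x, ((adj.get? x).isSome = true ↔ x ∈ ks)) ∧
  (∀ x l, adj.get? x = some l → ∀ nb, (nb ∈ l ↔ ((x, nb) ∈ s ∨ (nb, x) ∈ s)))

lemma adj_spec (ks : List String) :
    ∀ (s : List (String × String)), (∀ pr ∈ s, pr.1 ∈ ks ∧ pr.2 ∈ ks) →
    ∃ adj,
      s.foldl (fun d? pr => d?.bind fun d =>
          (d.get? pr.1).bind fun la =>
            let d1 := d.insert pr.1 (la ++ [pr.2])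
            (d1.get? pr.2).map fun lb => d1.insert pr.2 (lb ++ [pr.1]))
        (some (ks.foldl (fun d k => d.insert k ([] : List String)) PySem.Dict.empty)) = some adj ∧
      AdjP ks adj s := by
  intro s
  induction s using List.reverseRecOn with
  | nil =>
    intro _
    refine ⟨_, rfl, ?_, ?_⟩
    · intro x
      rw [foldl_insert_get? (fun _ => ([] : List String)) ks PySem.Dict.empty x]
      split <;> simp_all
    · intro x l hx nb
      rw [foldl_insert_get? (fun _ => ([] : List String)) ks PySem.Dict.empty x] at hx
      split at hx
      · cases hx; simp
      · simp at hx
  | append_singleton s pr ih =>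
    intro hmem
    obtain ⟨adj, hfold, hA⟩ := ih (fun q hq => hmem q (by simp [hq]))
    obtain ⟨a, b⟩ := pr
    have hab := hmem (a, b) (by simp)
    obtain ⟨la, hla⟩ := Option.isSome_iff_exists.1 ((hA.1 a).2 hab.1)
    set d1 := adj.insert a (la ++ [b]) with hd1
    have hd1b : (d1.get? b).isSome = true := by
      rw [hd1, PySem.Dict.get?_insert]
      split
    
      · simp
      · exact (hA.1 b).2 hab.2
    obtain ⟨lb, hlb⟩ := Option.isSome_iff_exists.1 hd1b
    refine ⟨d1.insert b (lb ++ [a]), ?_, ?_, ?_⟩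
    · rw [List.foldl_append, hfold, List.foldl_cons, List.foldl_nil]
      simp [hla, ← hd1, hlb]
    · intro x
      rw [PySem.Dict.get?_insert]
      by_cases h1 : x = b
      · simp only [if_pos h1]; subst h1; simpa using hab.2
      · simp only [if_neg h1]
        rw [hd1, PySem.Dict.get?_insert]
        by_cases h2 : x = a
        · simp only [if_pos h2]; subst h2; simpa using hab.1
        · simp only [if_neg h2]; exact hA.1 x
    · intro x l hx nb
      rw [PySem.Dict.get?_insert] at hx
      by_cases hxb : x = b
      · simp only [if_pos hxb] at hx
        cases hx
        subst hxb
        rw [hd1, PySem.Dict.get?_insert] at hlb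
        by_cases hba : x = a
        · simp only [if_pos hba] at hlb
          cases hlb
          subst hba
          have hmla := hA.2 x la hla nb
          simp only [List.mem_append, List.mem_singleton, Prod.mk.injEq, hmla]
          aesop
        · simp only [if_neg hba] at hlb
          have hmlb := hA.2 x lb hlb nb
          simp only [List.mem_append, List.mem_singleton, Prod.mk.injEq, hmlb]
          aesop
      · simp only [if_neg hxb] at hx
        rw [hd1, PySem.Dict.get?_insert] at hx
        by_cases hxa : x = a
        · simp only [if_pos hxa] at hx
          cases hx
          subst hxa
          have hmla := hA.2 x la hla nb
          simp only [List.mem_append, List.mem_singleton, Prod.mk.injEq, hmla]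
          aesop
        · simp only [if_neg hxa] at hx
          have hml := hA.2 x l hx nb
          simp only [List.mem_append, List.mem_singleton, Prod.mk.injEq, hml]
          aesop

lemma filter_count_drop (nb : String) (p q : String → Bool)
    (hp : p nb = true) (hq : q nb = false) :
    ∀ (ks : List String), ks.Nodup → nb ∈ ks → (∀ y ∈ ks, y ≠ nb → p y = q y) →
    (ks.filter p).length = (ks.filter q).length + 1 := by
  intro ks
  induction ks with
  | nil => simp
  | cons k rest ih =>
    intro hnd hmem hpq
    rcases List.mem_cons.1 hmem with rfl | hmem'
    · have hnotin : nb ∉ rest := (List.nodup_cons.1 hnd).1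
      have : rest.filter p = rest.filter q := by
        apply List.filter_congr
        intro y hy
        exact hpq y (by simp [hy]) (fun h => hnotin (h ▸ hy))
      simp [List.filter_cons, hp, hq, this]
    · have hknb : k ≠ nb := by rintro rfl; exact (List.nodup_cons.1 hnd).1 hmem'
      have hk := hpq k (by simp) hknb
      have := ih (List.nodup_cons.1 hnd).2 hmem' (fun y hy hne => hpq y (by simp [hy]) hne)
      by_cases hpk : p k = true
      · simp [List.filter_cons, hpk, hk ▸ hpk, this]
      · have hpk' : p k = false := by simpa using hpk
        simp [List.filter_cons, hpk', hk ▸ hpk', this]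

lemma sum_filter_extra (val : String → Int) (cur : String) (p q : String → Bool)
    (hp : p cur = true) (hq : q cur = false) :
    ∀ (seen : List String), seen.Nodup → cur ∈ seen → (∀ y ∈ seen, y ≠ cur → p y = q y) →
    ((seen.filter p).map val).sum = ((seen.filter q).map val).sum + val cur := by
  intro seen
  induction seen with
  | nil => simp
  | cons m rest ih =>
    intro hnd hmem hpq
    rcases List.mem_cons.1 hmem with rfl | hmem'
    · have hnotin : cur ∉ rest := (List.nodup_cons.1 hnd).1
      have : rest.filter p = rest.filter q := by
        apply List.filter_congr
        intro y hy
        exact hpq y (by simp [hy]) (fun h => hnotin (h ▸ hy))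
      simp [List.filter_cons, hp, hq, this]
      ring
    · have hmnb : m ≠ cur := by rintro rfl; exact (List.nodup_cons.1 hnd).1 hmem'
      have hk := hpq m (by simp) hmnb
      have := ih (List.nodup_cons.1 hnd).2 hmem' (fun y hy hne => hpq y (by simp [hy]) hne)
      by_cases hpk : p m = true
      · simp [List.filter_cons, hpk, hk ▸ hpk, this]
        ring
      · have hpk' : p m = false := by simpa using hpk
        simp [List.filter_cons, hpk', hk ▸ hpk', this]

lemma dfs_push (ks : List String) (hksnd : ks.Nodup) :
    ∀ (l : List String), (∀ y ∈ l, y ∈ ks) →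
    ∀ (seen st : List String), seen.Nodup → st.Nodup → (∀ y ∈ st, y ∈ seen) →
    (let r := l.foldl (fun (ss : PySem.Set String × List String) nb =>
        if PySem.Set.contains ss.1 nb then ss else (PySem.Set.add ss.1 nb, ss.2 ++ [nb])) (seen, st)
     r.1.Nodup ∧ r.2.Nodup ∧ (∀ y ∈ r.2, y ∈ r.1) ∧
     (∀ y, y ∈ r.1 ↔ (y ∈ seen ∨ y ∈ l)) ∧
     (∀ y, y ∈ r.2 ↔ (y ∈ st ∨ (y ∈ l ∧ y ∉ seen))) ∧
     (∃ fresh, r.1 = seen ++ fresh ∧ ∀ y ∈ fresh, y ∈ r.2) ∧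
     (r.2.length + (ks.filter (fun m => !(List.contains r.1 m))).length =
        st.length + (ks.filter (fun m => !(List.contains seen m))).length)) := by
  intro l
  induction l with
  | nil =>
    intro _ seen st h1 h2 h3
    exact ⟨h1, h2, h3, by simp, by simp, ⟨[], by simp⟩, rfl⟩
  | cons nb rest ih =>
    intro hlks seen st hseen hst hsub
    simp only [List.foldl_cons]
    by_cases hmem : nb ∈ seen
    · have hc : PySem.Set.contains seen nb = true := by
        simpa [PySem.Set.contains_iff] using hmem
      rw [if_pos hc]
      obtain ⟨a1, a2, a3, a4, a5, a6, a7⟩ := ih (fun y hy => hlks y (by simp [hy])) seen st hseen hst hsub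
      refine ⟨a1, a2, a3, ?_, ?_, a6, a7⟩
      · intro y
        rw [a4 y]
        constructor
        · tauto
        · rintro (h | h)
          · tauto
          · rcases List.mem_cons.1 h with rfl | h' <;> tauto
      · intro y
        rw [a5 y]
        constructor
        · tauto
        · rintro (h | ⟨h, hns⟩)
          · tauto
          · rcases List.mem_cons.1 h with rfl | h'
            · exact absurd hmem hns
            · tauto
    · have hc : PySem.Set.contains seen nb = false := by
        rw [Bool.eq_false_iff, Ne, PySem.Set.contains_iff]
        exact hmem
      rw [if_neg (by rw [PySem.Set.contains_iff]; exact hmem)]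
      have hadd : PySem.Set.add seen nb = seen ++ [nb] := PySem.Set.add_of_not_mem hmem
      simp only [hadd]
      have hnbst : nb ∉ st := fun h => hmem (hsub nb h)
      obtain ⟨a1, a2, a3, a4, a5, a6, a7⟩ := ih (fun y hy => hlks y (by simp [hy]))
        (seen ++ [nb]) (st ++ [nb])
        (by
          rw [List.nodup_append]
          refine ⟨hseen, List.nodup_singleton nb, ?_⟩
          intro y hy b hb
          have hb2 : b = nb := by simpa using hb
          subst hb2
          exact fun h => hmem (h ▸ hy))
        (by
          rw [List.nodup_append]
          refine ⟨hst, List.nodup_singleton nb, ?_⟩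
          intro y hy b hb
          have hb2 : b = nb := by simpa using hb
          subst hb2
          exact fun h => hnbst (h ▸ hy))
        (by
          intro y hy
          rcases List.mem_append.1 hy with h | h
          · exact List.mem_append.2 (Or.inl (hsub y h))
          · exact List.mem_append.2 (Or.inr h))
      refine ⟨a1, a2, a3, ?_, ?_, ?_, ?_⟩
      · intro y
        rw [a4 y]
        simp only [List.mem_append, List.mem_singleton, List.mem_cons, List.not_mem_nil, or_false]
        tauto
      · intro y
        rw [a5 y]
        simp only [List.mem_append, List.mem_singleton, List.mem_cons, List.not_mem_nil, or_false]
        constructor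
        · rintro ((h | rfl) | ⟨h, hns⟩)
          · exact Or.inl h
          · exact Or.inr ⟨Or.inl rfl, hmem⟩
          · exact Or.inr ⟨Or.inr h, fun hy => hns (Or.inl hy)⟩
        · rintro (h | ⟨h | h, hns⟩)
          · exact Or.inl (Or.inl h)
          · exact Or.inl (Or.inr h)
          · by_cases hynb : y = nb
            · exact Or.inl (Or.inr hynb)
            · exact Or.inr ⟨h, fun hy => (by rcases hy with hy | hy; exacts [hns hy, hynb hy] : False)⟩
      · obtain ⟨fresh, hf1, hf2⟩ := a6
        refine ⟨nb :: fresh, by simpa using hf1, ?_⟩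
        intro y hy
        rcases List.mem_cons.1 hy with rfl | h
        · exact (a5 y).2 (Or.inl (List.mem_append.2 (Or.inr (by simp))))
        · exact hf2 y h
      · rw [a7]
        have hdrop : (ks.filter (fun m => !(List.contains (seen ++ [nb]) m))).length + 1 =
            (ks.filter (fun m => !(List.contains seen m))).length := by
          have := filter_count_drop nb (fun m => !(List.contains seen m))
            (fun m => !(List.contains (seen ++ [nb]) m))
            (by simp [hmem]) (by simp) ks hksnd (hlks nb (by simp))
            (by intro y _ hne; simp [hne])
          omega
        have hlen : (st ++ [nb]).length = st.length + 1 := by simp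
        rw [hlen]
        omega

lemma dfs_spec (ks : List String) (hksnd : ks.Nodup)
    (adj : PySem.Dict String (List String)) (fd : PySem.Dict String Int)
    (hA1 : ∀ x, ((adj.get? x).isSome = true ↔ x ∈ ks))
    (hA2 : ∀ x l, adj.get? x = some l → ∀ nb ∈ l, nb ∈ ks)
    (P : String → Prop)
    (hPstep : ∀ y l nb, y ∈ ks → P y → adj.get? y = some l → nb ∈ l → P nb) :
    ∀ (fuel : Nat) (stack seen : List String) (total : Int),
    stack.Nodup → (∀ y ∈ stack, y ∈ seen) → seen.Nodup → (∀ y ∈ seen, y ∈ ks) →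
    (∀ y ∈ seen, P y) →
    (∀ y ∈ seen, y ∉ stack → ∀ l, adj.get? y = some l → ∀ nb ∈ l, nb ∈ seen) →
    (total = ((seen.filter (fun y => !(List.contains stack y))).map (fun m => fd.getD m 0)).sum) →
    (stack.length + (ks.filter (fun m => !(List.contains seen m))).length < fuel) →
    ∃ se tt, dfsCollect fuel adj fd stack seen total = some (se, tt) ∧
      (∀ y ∈ seen, y ∈ se) ∧ (∀ y ∈ se, y ∈ ks) ∧ se.Nodup ∧ (∀ y ∈ se, P y) ∧
      (∀ y ∈ se, ∀ l, adj.get? y = some l → ∀ nb ∈ l, nb ∈ se) ∧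
      tt = (se.map (fun m => fd.getD m 0)).sum := by
  intro fuel
  induction fuel with
  | zero => intro stack seen total _ _ _ _ _ _ _ hfuel; omega
  | succ fuel ih =>
    intro stack seen total hstk hsub hseen hsks hP hproc htot hfuel
    by_cases h : stack = []
    · subst h
      refine ⟨seen, total, ?_, fun y hy => hy, hsks, hseen, hP, ?_, ?_⟩
      · simp [dfsCollect]
      · intro y hy l hl nb hnb
        exact hproc y hy (by simp) l hl nb hnb
      · simpa using htot
    · set cur := stack.getLast h with hcur
      have hdec : stack.dropLast ++ [cur] = stack := List.dropLast_append_getLast h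
      have hcurstk : cur ∈ stack := List.getLast_mem h
      have hcurseen : cur ∈ seen := hsub cur hcurstk
      have hcurks : cur ∈ ks := hsks cur hcurseen
      obtain ⟨nbs, hadj⟩ := Option.isSome_iff_exists.1 ((hA1 cur).2 hcurks)
      have hnbsks : ∀ nb ∈ nbs, nb ∈ ks := hA2 cur nbs hadj
      have hdlnd : stack.dropLast.Nodup := (List.dropLast_sublist stack).nodup hstk
      have hms : ∀ y, y ∈ stack ↔ (y ∈ stack.dropLast ∨ y = cur) := by
        intro y
        conv_lhs => rw [← hdec]
        simp
      have hcurdl : cur ∉ stack.dropLast := by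
        intro hc
        rw [← hdec] at hstk
        rw [List.nodup_append] at hstk
        exact hstk.2.2 cur hc cur (by simp) rfl
      obtain ⟨a1, a2, a3, a4, a5, a6, a7⟩ :=
        dfs_push ks hksnd nbs hnbsks seen stack.dropLast hseen hdlnd
          (fun y hy => hsub y ((hms y).2 (Or.inl hy)))
      set r := nbs.foldl (fun (ss : PySem.Set String × List String) nb =>
          if PySem.Set.contains ss.1 nb then ss else (PySem.Set.add ss.1 nb, ss.2 ++ [nb]))
        (seen, stack.dropLast) with hr
      obtain ⟨se, tt, heq, b1, b2, b3, b4, b5, b6⟩ :=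
        ih r.2 r.1 (total + fd.getD cur 0) a2 a3 a1
          (by
            intro y hy
            rcases (a4 y).1 hy with h' | h'
            · exact hsks y h'
            · exact hnbsks y h')
          (by
            intro y hy
            rcases (a4 y).1 hy with h' | h'
            · exact hP y h'
            · exact hPstep cur nbs y hcurks (hP cur hcurseen) hadj h')
          (by
            intro y hy hnst l hl nb hnb
            by_cases hys : y ∈ seen
            · by_cases hyc : y = cur
              · subst hyc
                rw [hadj] at hl
                cases hl
                exact (a4 nb).2 (Or.inr hnb)
              · have hynstk : y ∉ stack := by
                  intro hc
                  rcases (hms y).1 hc with hc' | hc'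
                  · exact hnst ((a5 y).2 (Or.inl hc'))
                  · exact hyc hc'
                exact (a4 nb).2 (Or.inl (hproc y hys hynstk l hl nb hnb))
            · rcases (a4 y).1 hy with h' | h'
              · exact absurd h' hys
              · exact absurd ((a5 y).2 (Or.inr ⟨h', hys⟩)) hnst)
          (by
            -- total' bookkeeping
            obtain ⟨fresh, hf1, hf2⟩ := a6
            have hfilterfresh : fresh.filter (fun y => !(List.contains r.2 y)) = [] := by
              rw [List.filter_eq_nil_iff]
              intro y hy
              simp [hf2 y hy]
            have hsplit : r.1.filter (fun y => !(List.contains r.2 y)) =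
                seen.filter (fun y => !(List.contains r.2 y)) := by
              rw [hf1, List.filter_append, hfilterfresh, List.append_nil]
            have hcongr : seen.filter (fun y => !(List.contains r.2 y)) =
                seen.filter (fun y => !(List.contains stack.dropLast y)) := by
              apply List.filter_congr
              intro y hy
              have hiff : (y ∈ r.2) ↔ y ∈ stack.dropLast := by
                rw [a5 y]
                constructor
                · rintro (h' | ⟨_, hns⟩)
                  · exact h'
                  · exact absurd hy hns
                · exact Or.inl
              have hcont : List.contains r.2 y = List.contains stack.dropLast y := by
                by_cases hmem2 : y ∈ stack.dropLast
                · have e1 : List.contains r.2 y = true := by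
                    rw [List.contains_iff_mem]; exact hiff.2 hmem2
                  have e2 : List.contains stack.dropLast y = true := by
                    rw [List.contains_iff_mem]; exact hmem2
                  rw [e1, e2]
                · have e1 : List.contains r.2 y = false := by
                    rw [Bool.eq_false_iff, Ne, List.contains_iff_mem]
                    exact fun hc => hmem2 (hiff.1 hc)
                  have e2 : List.contains stack.dropLast y = false := by
                    rw [Bool.eq_false_iff, Ne, List.contains_iff_mem]; exact hmem2
                  rw [e1, e2]
              simp only [hcont]
            have hsum := sum_filter_extra (fun m => fd.getD m 0) cur
              (fun y => !(List.contains stack.dropLast y))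
              (fun y => !(List.contains stack y))
              (by
                have e1 : List.contains stack.dropLast cur = false := by
                  rw [Bool.eq_false_iff, Ne, List.contains_iff_mem]
                  exact hcurdl
                show (!List.contains stack.dropLast cur) = true
                rw [e1]; rfl)
              (by
                have e1 : List.contains stack cur = true := by
                  rw [List.contains_iff_mem]; exact hcurstk
                show (!List.contains stack cur) = false
                rw [e1]; rfl)
              seen hseen hcurseen
              (by
                intro y hy hne
                have hiff : (y ∈ stack) ↔ y ∈ stack.dropLast := by
                  rw [hms y]
                  exact ⟨fun h' => h'.resolve_right hne, Or.inl⟩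
                by_cases hmem2 : y ∈ stack.dropLast
                · have e1 : List.contains stack.dropLast y = true := by
                    rw [List.contains_iff_mem]; exact hmem2
                  have e2 : List.contains stack y = true := by
                    rw [List.contains_iff_mem]; exact hiff.2 hmem2
                  simp only [e1, e2]
                · have h1 : y ∉ stack := fun hc => hmem2 (hiff.1 hc)
                  have e1 : List.contains stack.dropLast y = false := by
                    rw [Bool.eq_false_iff, Ne, List.contains_iff_mem]; exact hmem2
                  have e2 : List.contains stack y = false := by
                    rw [Bool.eq_false_iff, Ne, List.contains_iff_mem]; exact h1
                  simp only [e1, e2])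
            rw [hsplit, hcongr, hsum, ← htot])
          (by
            have hdll : stack.dropLast.length = stack.length - 1 := by simp
            have hpos : 0 < stack.length := List.length_pos_iff.2 h
            omega)
      refine ⟨se, tt, ?_, fun y hy => b1 y ((a4 y).2 (Or.inl hy)), b2, b3, b4, b5, b6⟩
      rw [show dfsCollect (fuel+1) adj fd stack seen total =
          (match adj.get? (stack.getLast h) with
           | none => none
           | some nbs =>
             dfsCollect fuel adj fd
               (nbs.foldl (fun (ss : PySem.Set String × List String) nb =>
                 if PySem.Set.contains ss.1 nb then ss else (PySem.Set.add ss.1 nb, ss.2 ++ [nb]))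
                 (seen, stack.dropLast)).2
               (nbs.foldl (fun (ss : PySem.Set String × List String) nb =>
                 if PySem.Set.contains ss.1 nb then ss else (PySem.Set.add ss.1 nb, ss.2 ++ [nb]))
                 (seen, stack.dropLast)).1
               (total + fd.getD (stack.getLast h) 0)
           : Option (PySem.Set String × Int)) from by
        simp only [dfsCollect, dif_neg h]]
      rw [hadj]
      exact heq

lemma comp_spec (ks : List String) (hksnd : ks.Nodup)
    (adj : PySem.Dict String (List String)) (fd : PySem.Dict String Int)
    (syn : List (String × String)) (hAdj : AdjP ks adj syn)
    (hends : ∀ pr ∈ syn, pr.1 ∈ ks ∧ pr.2 ∈ ks)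
    (k : String) (hk : k ∈ ks) :
    ∃ se tt, dfsCollect (ks.length + 1) adj fd [k] (PySem.Set.ofList [k]) 0 = some (se, tt) ∧
      se.Nodup ∧ (∀ m, (m ∈ se ↔ (m ∈ ks ∧ ERel syn k m))) ∧
      tt = (se.map (fun m => fd.getD m 0)).sum := by
  have hA2 : ∀ x l, adj.get? x = some l → ∀ nb ∈ l, nb ∈ ks := by
    intro x l hx nb hnb
    rcases (hAdj.2 x l hx nb).1 hnb with h | h
    · exact (hends _ h).2
    · exact (hends _ h).1
  have hofl : PySem.Set.ofList [k] = [k] := rfl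
  obtain ⟨se, tt, heq, hsub, hseks, hnd, hsound, hclosed, htt⟩ :=
    dfs_spec ks hksnd adj fd hAdj.1 hA2 (fun y => ERel syn k y)
      (by
        intro y l nb hyks hy hl hnb
        refine erel_trans syn k y nb hy (Relation.EqvGen.rel y nb ?_)
        exact (hAdj.2 y l hl nb).1 hnb)
      (ks.length + 1) [k] [k] 0
      (by simp) (by simp) (by simp) (by simpa using hk)
      (by simp [erel_refl])
      (by intro y hy hny; simp at hy; simp [hy] at hny)
      (by
        have : List.contains [k] k = true := by rw [List.contains_iff_mem]; simp
        simp [List.filter_cons, this])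
      (by
        have hlen : (ks.filter (fun m => !(List.contains ([] : List String) m))).length =
            (ks.filter (fun m => !(List.contains [k] m))).length + 1 := by
          refine filter_count_drop k (fun m => !(List.contains ([] : List String) m))
            (fun m => !(List.contains [k] m)) (by simp)
            (by
              have e1 : List.contains [k] k = true := by rw [List.contains_iff_mem]; simp
              simp [e1]) ks hksnd hk ?_
          intro y _ hne
          have e2 : List.contains [k] y = false := by
            rw [Bool.eq_false_iff, Ne, List.contains_iff_mem]; simpa using hne
          simp [e2, hne]
        have hid : (ks.filter (fun m => !(List.contains ([] : List String) m))) = ks := by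
          apply List.filter_eq_self.2
          intro y _; simp
        rw [hid] at hlen
        simp only [List.length_cons, List.length_nil]
        omega)
  rw [hofl]
  refine ⟨se, tt, heq, hnd, ?_, htt⟩
  intro m
  constructor
  · intro hm
    exact ⟨hseks m hm, hsound m hm⟩
  · rintro ⟨hmks, hrel⟩
    -- closure argument over the EqvGen derivation
    have key : ∀ u v, ERel syn u v → ((u ∈ se → v ∈ se) ∧ (v ∈ se → u ∈ se)) := by
      intro u v h
      induction h with
      | rel x y hxy =>
        constructor
        · intro hx
          obtain ⟨l, hl⟩ := Option.isSome_iff_exists.1 ((hAdj.1 x).2 (hseks x hx))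
          exact hclosed x hx l hl y ((hAdj.2 x l hl y).2 hxy)
        · intro hy
          obtain ⟨l, hl⟩ := Option.isSome_iff_exists.1 ((hAdj.1 y).2 (hseks y hy))
          refine hclosed y hy l hl x ((hAdj.2 y l hl x).2 ?_)
          tauto
      | refl x => exact ⟨id, id⟩
      | symm x y _ ih => exact ⟨ih.2, ih.1⟩
      | trans x y z _ _ ih1 ih2 => exact ⟨fun h => ih2.1 (ih1.1 h), fun h => ih1.2 (ih2.2 h)⟩
    exact (key k m hrel).1 (hsub k (by simp))

lemma cs_insert_get? (t : Int) :
    ∀ (l : List String) (cs : PySem.Dict String Int) (m : String),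
      ((l.foldl (fun c x => c.insert x t) cs).get? m) = if m ∈ l then some t else cs.get? m := by
  intro l
  induction l with
  | nil => simp
  | cons x rest ih =>
    intro cs m
    rw [List.foldl_cons, ih]
    by_cases hm : m ∈ rest
    · simp [hm]
    · rw [PySem.Dict.get?_insert]
      by_cases hmx : m = x
      · subst hmx; simp [hm]
      · simp [hm, hmx, List.mem_cons]

lemma bmain_spec (ks : List String) (adj : PySem.Dict String (List String))
    (fd : PySem.Dict String Int) (g : String → Int)
    (hdfs : ∀ k ∈ ks, ∃ se, dfsCollect (ks.length + 1) adj fd [k] (PySem.Set.ofList [k]) 0 =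
        some (se, g k) ∧ k ∈ se ∧ (∀ m ∈ se, m ∈ ks ∧ g m = g k)) :
    ∀ (ms : List String), (∀ m ∈ ms, m ∈ ks) → ms.Nodup →
    ∀ (res0 cs0 : PySem.Dict String Int),
      (∀ m t, cs0.get? m = some t → (m ∈ ks ∧ t = g m)) →
      (∀ m ∈ ms, res0.contains m = false) →
    ∃ res cs,
      ms.foldl (fun acc? k => acc?.bind fun acc =>
          if acc.2.contains k then some (acc.1.insert k (acc.2.getD k 0), acc.2)
          else
            (dfsCollect (ks.length + 1) adj fd [k] (PySem.Set.ofList [k]) 0).map fun se =>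
              (acc.1.insert k ((se.1.foldl (fun c m => c.insert m se.2) acc.2).getD k 0),
               se.1.foldl (fun c m => c.insert m se.2) acc.2)) (some (res0, cs0)) = some (res, cs) ∧
      res.items = res0.items ++ ms.map (fun k => (k, g k)) := by
  intro ms
  induction ms with
  | nil =>
    intro _ _ res0 cs0 _ _
    exact ⟨res0, cs0, rfl, by simp⟩
  | cons k rest ih =>
    intro hmem hnd res0 cs0 hcs hfresh
    have hkks : k ∈ ks := hmem k (by simp)
    have hfresh' : ∀ (r1 : PySem.Dict String Int) (v : Int), (∀ m ∈ k :: rest, r1.contains m = false) →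
        ∀ m ∈ rest, (r1.insert k v).contains m = false := by
      intro r1 v hf m hm
      rw [PySem.Dict.contains_insert]
      have hmk : m ≠ k := by rintro rfl; exact (List.nodup_cons.1 hnd).1 hm
      simp [hmk, hf m (by simp [hm])]
    by_cases hc : cs0.contains k = true
    · obtain ⟨t, ht⟩ := Option.isSome_iff_exists.1 (PySem.Dict.contains_eq_isSome_get? cs0 k ▸ hc)
      have hgk : t = g k := (hcs k t ht).2
      obtain ⟨res, cs, hfold, hitems⟩ :=
        ih (fun q hq => hmem q (by simp [hq])) hnd.of_cons
          (res0.insert k (cs0.getD k 0)) cs0 hcs (hfresh' res0 _ hfresh)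
      refine ⟨res, cs, ?_, ?_⟩
      · rw [List.foldl_cons]
        simp only [Option.bind_some, if_pos hc]
        exact hfold
      · rw [hitems, PySem.Dict.items_insert_of_not_contains res0 _ (hfresh k (by simp))]
        have : cs0.getD k 0 = g k := by
          rw [PySem.Dict.getD_eq_get?_getD, ht, hgk]; rfl
        simp [this]
    · obtain ⟨se, hse, hkse, hseg⟩ := hdfs k hkks
      set cs1 := se.foldl (fun c m => c.insert m (g k)) cs0 with hcs1
      have hcs1get : ∀ m t, cs1.get? m = some t → (m ∈ ks ∧ t = g m) := by
        intro m t hm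
        rw [hcs1, cs_insert_get? (g k) se cs0 m] at hm
        split at hm
        · rename_i hmse
          cases hm
          exact ⟨(hseg m hmse).1, ((hseg m hmse).2).symm⟩
        · exact hcs m t hm
      have hcs1k : cs1.getD k 0 = g k := by
        rw [PySem.Dict.getD_eq_get?_getD, hcs1, cs_insert_get? (g k) se cs0 k, if_pos hkse]
        rfl
      obtain ⟨res, cs, hfold, hitems⟩ :=
        ih (fun q hq => hmem q (by simp [hq])) hnd.of_cons
          (res0.insert k (cs1.getD k 0)) cs1 hcs1get (hfresh' res0 _ hfresh)
      refine ⟨res, cs, ?_, ?_⟩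
      · rw [List.foldl_cons]
        simp only [Option.bind_some, if_neg hc, hse, Option.map_some]
        exact hfold
      · rw [hitems, PySem.Dict.items_insert_of_not_contains res0 _ (hfresh k (by simp))]
        simp [hcs1k]

lemma ks_mem (freq : List (String × Int)) (x : String) :
    x ∈ (PySem.Dict.ofList freq).keys ↔ x ∈ freq.map Prod.fst := by
  have h := PySem.Dict.keys_foldl_insert_key (l := freq) (key := Prod.fst)
    (f := fun _ p => p.2) (d := (PySem.Dict.empty : PySem.Dict String Int))
  rw [show PySem.Dict.ofList freq = freq.foldl (fun d x => d.insert x.1 x.2) PySem.Dict.empty from rfl]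
  rw [h, PySem.Dict.keys_empty, PySem.Set.update_nil_left, PySem.Set.mem_ofList]

lemma baby_names_eq : ∀ (freq : List (String × Int)) (synonyms : List (String × String)),
    Pre_baby_names freq synonyms → baby_names freq synonyms = baby_names_alt freq synonyms := by
  intro freq synonyms hpre
  have hksnd : (PySem.Dict.ofList freq).keys.Nodup := PySem.Dict.nodup_keys_ofList freq
  have hends : ∀ pr ∈ synonyms, pr.1 ∈ (PySem.Dict.ofList freq).keys ∧ pr.2 ∈ (PySem.Dict.ofList freq).keys :=
    fun pr hpr => ⟨(ks_mem freq pr.1).2 (hpre pr hpr).1, (ks_mem freq pr.2).2 (hpre pr hpr).2⟩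
  -- ===== A side =====
  obtain ⟨p, rank, hfold, hC, hB, hRk, hrel⟩ :=
    unions_spec (PySem.Dict.ofList freq).keys (synonyms.length + 2) synonyms hends (by omega)
  obtain ⟨gs, p1, hgs, hC1, hB1, hAg1, hgsval⟩ :=
    gs_spec (PySem.Dict.ofList freq).keys (synonyms.length + 2) (synonyms.length + 1)
      (PySem.Dict.ofList freq) (fun m => rootIter (synonyms.length + 1) p m) (by omega)
      (PySem.Dict.ofList freq).keys (fun m hm => hm) p PySem.Dict.empty hC hB
      (fun m hm => bnd_rooted _ p _ hB m hm)
  obtain ⟨res, p2, hres, hresitems⟩ :=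
    res_spec (PySem.Dict.ofList freq).keys (synonyms.length + 2) (synonyms.length + 1)
      gs (fun m => rootIter (synonyms.length + 1) p m) (by omega)
      (PySem.Dict.ofList freq).keys (fun m hm => hm) hksnd p1 PySem.Dict.empty hC1 hB1
      (fun m hm => agrees_rootof p p1 hAg1 m _ (bnd_rooted _ p _ hB m hm))
      (by intro m _; rfl)
  have hA : baby_names freq synonyms = res.items := by
    simp only [baby_names]
    rw [hfold]
    dsimp only
    rw [hgs]
    dsimp only
    rw [hres]
  -- ===== B side =====
  obtain ⟨adj, hadjfold, hAdjP⟩ := adj_spec (PySem.Dict.ofList freq).keys synonyms hends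
  have hdfs : ∀ k ∈ (PySem.Dict.ofList freq).keys, ∃ se,
      dfsCollect ((PySem.Dict.ofList freq).keys.length + 1) adj (PySem.Dict.ofList freq)
        [k] (PySem.Set.ofList [k]) 0 = some (se,
          (((PySem.Dict.ofList freq).keys.filter (fun m => rootIter (synonyms.length + 1) p m ==
              rootIter (synonyms.length + 1) p k)).map (fun m => (PySem.Dict.ofList freq).getD m 0)).sum) ∧
      k ∈ se ∧ (∀ m ∈ se, m ∈ (PySem.Dict.ofList freq).keys ∧
        (((PySem.Dict.ofList freq).keys.filter (fun j => rootIter (synonyms.length + 1) p j ==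
            rootIter (synonyms.length + 1) p m)).map (fun j => (PySem.Dict.ofList freq).getD j 0)).sum =
        (((PySem.Dict.ofList freq).keys.filter (fun j => rootIter (synonyms.length + 1) p j ==
            rootIter (synonyms.length + 1) p k)).map (fun j => (PySem.Dict.ofList freq).getD j 0)).sum) := by
    intro k hk
    obtain ⟨se, tt, heq, hnd, hchar, htt⟩ :=
      comp_spec (PySem.Dict.ofList freq).keys hksnd adj (PySem.Dict.ofList freq) synonyms hAdjP hends k hk
    have hfilterchar : ∀ m, (m ∈ (PySem.Dict.ofList freq).keys.filter
        (fun m => rootIter (synonyms.length + 1) p m == rootIter (synonyms.length + 1) p k)) ↔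
        (m ∈ (PySem.Dict.ofList freq).keys ∧ ERel synonyms k m) := by
      intro m
      rw [List.mem_filter]
      constructor
      · rintro ⟨hm, hbeq⟩
        have heqr : rootIter (synonyms.length + 1) p m = rootIter (synonyms.length + 1) p k :=
          (beq_iff_eq ..).1 hbeq
        have hsc : SameC p m k := (sameC_iff_root_eq _ p _ hB m k hm hk).2 heqr
        exact ⟨hm, erel_symm synonyms m k ((hrel m hm k hk).1 hsc)⟩
      · rintro ⟨hm, hr⟩
        have hsc : SameC p m k := (hrel m hm k hk).2 (erel_symm synonyms k m hr)
        have heqr := (sameC_iff_root_eq _ p (synonyms.length + 1) hB m k hm hk).1 hsc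
        exact ⟨hm, (beq_iff_eq ..).2 heqr⟩
    have hperm : se.Perm ((PySem.Dict.ofList freq).keys.filter
        (fun m => rootIter (synonyms.length + 1) p m == rootIter (synonyms.length + 1) p k)) := by
      rw [List.perm_ext_iff_of_nodup hnd (hksnd.filter _)]
      intro m
      rw [hchar m, hfilterchar m]
    have httg : tt = (((PySem.Dict.ofList freq).keys.filter
        (fun m => rootIter (synonyms.length + 1) p m == rootIter (synonyms.length + 1) p k)).map
          (fun m => (PySem.Dict.ofList freq).getD m 0)).sum := by
      rw [htt]
      exact (hperm.map (fun m => (PySem.Dict.ofList freq).getD m 0)).sum_eq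
    refine ⟨se, by rw [heq, httg], (hchar k).2 ⟨hk, erel_refl synonyms k⟩, ?_⟩
    intro m hm
    obtain ⟨hmks, hr⟩ := (hchar m).1 hm
    have hsc : SameC p m k := (hrel m hmks k hk).2 (erel_symm synonyms k m hr)
    have heqr := (sameC_iff_root_eq _ p (synonyms.length + 1) hB m k hmks hk).1 hsc
    refine ⟨hmks, ?_⟩
    rw [heqr]
  obtain ⟨resB, csB, hfoldB, hitemsB⟩ :=
    bmain_spec (PySem.Dict.ofList freq).keys adj (PySem.Dict.ofList freq)
      (fun k => (((PySem.Dict.ofList freq).keys.filter (fun m => rootIter (synonyms.length + 1) p m ==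
          rootIter (synonyms.length + 1) p k)).map (fun m => (PySem.Dict.ofList freq).getD m 0)).sum)
      hdfs (PySem.Dict.ofList freq).keys (fun m hm => hm) hksnd
      PySem.Dict.empty PySem.Dict.empty
      (by intro m t h; simp [PySem.Dict.get?_empty] at h)
      (by intro m _; rfl)
  have hBeq : baby_names_alt freq synonyms = resB.items := by
    simp only [baby_names_alt]
    rw [hadjfold]
    dsimp only
    rw [hfoldB]
  rw [hA, hBeq, hresitems, hitemsB]
  have hempty : (PySem.Dict.empty : PySem.Dict String Int).items = [] := rfl
  rw [hempty, List.nil_append, List.nil_append]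
  apply List.map_congr_left
  intro k _
  have := hgsval (rootIter (synonyms.length + 1) p k)
  rw [this]
  simp [PySem.Dict.getD_empty]

-- ===== VERDICT (by name: the statement is the Claim_ definition above) =====
theorem baby_names_spec : Claim_equal_baby_names := by
  intro freq synonyms _ hpre
  exact baby_names_eq freq synonyms hpre
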